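-- pv_equiv track=rewrite | github.com/diogorrio/discovering_fm_for_treewidth | graph_data/graph_structure.py | make_graphs
-- ===== SOURCE A (Python) =====
-- def make_graphs(n=2, i=None, j=None):
--     graph = []
--     if i is None:
--         graph = [[(0, 1)] + r for r in make_graphs(n=n, i=0, j=1)]
--     elif j < n - 1:
--         graph += [[(i, j + 1)] + r for r in make_graphs(n=n, i=i, j=j + 1)]
--         graph += [r for r in make_graphs(n=n, i=i, j=j + 1)]
--     elif i < n - 1:
--         graph = make_graphs(n=n, i=i + 1, j=i + 1)
--     else:
--         graph = [[]]
--
--     return graph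
-- ===== SOURCE B (Python) =====
-- def make_graphs(n=2, i=None, j=None):
--     if i is None:
--         return [[(0, 1)] + g for g in make_graphs(n=n, i=0, j=1)]
--     # collect, in one pass, the edges A's recursion chooses over from state (i, j)
--     edges = [(i, c) for c in range(j + 1, n)]
--     edges += [(k, c) for k in range(i + 1, n) for c in range(k + 1, n)]
--     # fold back-to-front: each edge doubles the list (include-first, then exclude)
--     graphs = [[]]
--     for e in reversed(edges):
--         graphs = [[e] + g for g in graphs] + graphs
--     return graphs
-- ===== Notes on version B (the rewrite author's own statement) =====
-- stated objective: alternative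
-- what changed: A's branching recursion evaluates the same suffix recursion twice per edge and re-walks the (i,j) state space; B collects the edge sequence with two range comprehensions in one pass, then builds all subsets with a single backward fold that doubles the list per edge.
import Mathlib
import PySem

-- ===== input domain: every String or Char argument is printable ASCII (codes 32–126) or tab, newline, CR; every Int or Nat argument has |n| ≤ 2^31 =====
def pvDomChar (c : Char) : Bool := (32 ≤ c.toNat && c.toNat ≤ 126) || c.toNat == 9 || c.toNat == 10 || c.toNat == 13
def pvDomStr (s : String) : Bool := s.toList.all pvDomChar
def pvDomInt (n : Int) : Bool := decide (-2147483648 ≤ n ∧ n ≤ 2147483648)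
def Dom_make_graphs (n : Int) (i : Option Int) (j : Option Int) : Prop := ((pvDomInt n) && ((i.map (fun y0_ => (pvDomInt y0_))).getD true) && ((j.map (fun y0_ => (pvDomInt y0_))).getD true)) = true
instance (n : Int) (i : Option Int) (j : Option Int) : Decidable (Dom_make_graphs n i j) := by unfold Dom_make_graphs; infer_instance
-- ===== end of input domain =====

-- B replaces A's twice-evaluated branching recursion by a one-pass edge collection plus a
-- single backward fold over the edges (alternative structure; the output itself is exponential).

-- ===== PORT A =====
def make_graphs (n : Int) (i : Option Int) (j : Option Int) : List (List (Int × Int)) :=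
  match i, j with
  | none, _ =>
      (make_graphs n (some 0) (some 1)).map (fun r => (0, 1) :: r)
  | some _, none => []   -- Python A raises TypeError here (None < int); excluded by Pre_
  | some i, some j =>
      if j < n - 1 then
        ((make_graphs n (some i) (some (j + 1))).map (fun r => (i, j + 1) :: r))
          ++ (make_graphs n (some i) (some (j + 1))).map (fun r => r)
      else if i < n - 1 then
        make_graphs n (some (i + 1)) (some (i + 1))
      else
        [[]]
termination_by ((match i with | none => 1 | some _ => 0),
                (n - 1 - i.getD 0).toNat, (n - 1 - j.getD 0).toNat)
decreasing_by
  · exact Prod.Lex.left _ _ (by omega)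
  · exact Prod.Lex.right _ (Prod.Lex.right _ (by simp [Option.getD]; omega))
  · exact Prod.Lex.right _ (Prod.Lex.left _ _ (by simp [Option.getD]; omega))

-- ===== PORT B =====
def make_graphs_alt (n : Int) (i : Option Int) (j : Option Int) : List (List (Int × Int)) :=
  match i, j with
  | none, _ =>
      (make_graphs_alt n (some 0) (some 1)).map (fun g => (0, 1) :: g)
  | some _, none => []   -- Python B raises TypeError here (range(None+1, n)); excluded by Pre_
  | some i, some j =>
      let edges :=
        ((PySem.List.pyRange (j + 1) n 1).map (fun c => (i, c)))
          ++ ((PySem.List.pyRange (i + 1) n 1).flatMap (fun k =>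
                (PySem.List.pyRange (k + 1) n 1).map (fun c => (k, c))))
      edges.reverse.foldl (fun graphs e => graphs.map (fun g => e :: g) ++ graphs) [[]]
termination_by (match i with | none => 1 | some _ => 0)
decreasing_by simp

-- ===== PRECONDITION & SPEC =====
-- Pre_ excludes exactly the calls with i an int but j = None, on which Python A raises
-- TypeError at 'j < n - 1' (and B raises at 'range(j + 1, n)').
def Pre_make_graphs (n : Int) (i : Option Int) (j : Option Int) : Prop :=
  i.isSome → j.isSome
instance (n : Int) (i : Option Int) (j : Option Int) : Decidable (Pre_make_graphs n i j) := by
  unfold Pre_make_graphs; infer_instance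
def pvWitness_make_graphs : Int × Option Int × Option Int := (3, none, none)

def Spec_make_graphs (n : Int) (i : Option Int) (j : Option Int) (out : List (List (Int × Int))) : Prop := out = make_graphs_alt n i j
instance (n : Int) (i : Option Int) (j : Option Int) (out : List (List (Int × Int))) : Decidable (Spec_make_graphs n i j out) := by unfold Spec_make_graphs; infer_instance

-- ===== CLAIM (what is proved, stated in full; the proofs are below) =====
def Claim_equal_make_graphs : Prop := ∀ (n : Int) (i : Option Int) (j : Option Int), Dom_make_graphs n i j → Pre_make_graphs n i j → Spec_make_graphs n i j (make_graphs n i j)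

-- ===== LEMMAS AND PROOFS =====

-- the backward fold of B, written as a foldr for the proofs
def buildF (es : List (Int × Int)) : List (List (Int × Int)) :=
  es.foldr (fun e graphs => graphs.map (fun g => e :: g) ++ graphs) [[]]

def edgesOf (n i j : Int) : List (Int × Int) :=
  ((PySem.List.pyRange (j + 1) n 1).map (fun c => (i, c)))
    ++ ((PySem.List.pyRange (i + 1) n 1).flatMap (fun k =>
          (PySem.List.pyRange (k + 1) n 1).map (fun c => (k, c))))

theorem alt_some_eq (n i j : Int) :
    make_graphs_alt n (some i) (some j) = buildF (edgesOf n i j) := by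
  rw [make_graphs_alt]
  simp [buildF, edgesOf, List.foldl_reverse]

theorem alt_step (n i j : Int) (h : j < n - 1) :
    make_graphs_alt n (some i) (some j)
      = (make_graphs_alt n (some i) (some (j + 1))).map (fun g => (i, j + 1) :: g)
        ++ make_graphs_alt n (some i) (some (j + 1)) := by
  rw [alt_some_eq, alt_some_eq]
  have hcons : PySem.List.pyRange (j + 1) n 1 = (j + 1) :: PySem.List.pyRange (j + 1 + 1) n 1 :=
    PySem.List.pyRange_one_cons (by omega)
  rw [edgesOf, hcons]
  simp [edgesOf, buildF]

theorem alt_next_row (n i j : Int) (hj : ¬ j < n - 1) (hi : i < n - 1) :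
    make_graphs_alt n (some i) (some j) = make_graphs_alt n (some (i + 1)) (some (i + 1)) := by
  rw [alt_some_eq, alt_some_eq]
  have h1 : PySem.List.pyRange (j + 1) n 1 = [] := PySem.List.pyRange_one_eq_nil (by omega)
  have h2 : PySem.List.pyRange (i + 1) n 1 = (i + 1) :: PySem.List.pyRange (i + 1 + 1) n 1 :=
    PySem.List.pyRange_one_cons (by omega)
  rw [edgesOf, edgesOf, h1, h2]
  simp [List.flatMap_cons]

theorem alt_base (n i j : Int) (hj : ¬ j < n - 1) (hi : ¬ i < n - 1) :
    make_graphs_alt n (some i) (some j) = [[]] := by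
  rw [alt_some_eq]
  have h1 : PySem.List.pyRange (j + 1) n 1 = [] := PySem.List.pyRange_one_eq_nil (by omega)
  have h2 : PySem.List.pyRange (i + 1) n 1 = [] := PySem.List.pyRange_one_eq_nil (by omega)
  rw [edgesOf, h1, h2]
  simp [buildF]

theorem core_eq (n i j : Int) :
    make_graphs n (some i) (some j) = make_graphs_alt n (some i) (some j) := by
  rw [make_graphs]
  split_ifs with h1 h2
  · rw [core_eq n i (j + 1), alt_step n i j h1]
    simp
  · rw [core_eq n (i + 1) (i + 1), alt_next_row n i j h1 h2]
  · rw [alt_base n i j h1 h2]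
termination_by ((n - 1 - i).toNat, (n - 1 - j).toNat)
decreasing_by
  · exact Prod.Lex.right _ (by omega)
  · exact Prod.Lex.left _ _ (by omega)

-- ===== VERDICT (by name: the statement is the Claim_ definition above) =====
theorem make_graphs_spec : Claim_equal_make_graphs := by
  intro n i j _ hpre
  unfold Spec_make_graphs
  match i, j with
  | none, j =>
      rw [make_graphs, make_graphs_alt, core_eq]
  | some i, some j =>
      exact core_eq n i j
  | some i, none =>
      exact absurd (hpre rfl) (by simp)
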